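-- pv_equiv track=rewrite | github.com/akeyi2018/menta | maze/astar_with_route.py | get_route_path
-- ===== SOURCE A (Python) =====
-- def get_route_path(maze, path):
--     results = []
--     for i in range(len(maze)):
--         inner = []
--         for j in range(len(maze[0])):
--             if (i,j) == path[0]:
--                 inner.append(2)
--             elif (i,j) == path[-1]:
--                 inner.append(3)
--             elif (i,j) in path:
--                 inner.append(4)
--             elif maze[i][j] == 1:
--                 inner.append(1)
--             else:
--                 inner.append(0)
--         results.append(inner)
--     return results
-- ===== SOURCE B (Python) =====
-- def get_route_path(maze, path):
--     cols = len(maze[0]) if maze else 0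
--     results = [[1 if v == 1 else 0 for v in row[:cols]] for row in maze]
--     if results and cols > 0 and path:
--         rows = len(maze)
--         def put(cell, v):
--             i, j = cell
--             if 0 <= i < rows and 0 <= j < cols:
--                 results[i][j] = v
--         for cell in path:
--             put(cell, 4)
--         put(path[-1], 3)
--         put(path[0], 2)
--     return results
-- ===== Notes on version B (the rewrite author's own statement) =====
-- stated objective: faster
-- what changed: B builds the plain 0/1 grid in one comprehension and then overlays path cells (4), the end (3) and the start (2) with bounds-guarded writes, instead of classifying every cell with a per-cell if/elif priority chain scanning the whole path.
-- outside the precondition, e.g. on get_route_path([[0, 0], [0]], [(1, 1)]): A returns [[0, 0], [0, 2]], B raises IndexError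
import Mathlib
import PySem

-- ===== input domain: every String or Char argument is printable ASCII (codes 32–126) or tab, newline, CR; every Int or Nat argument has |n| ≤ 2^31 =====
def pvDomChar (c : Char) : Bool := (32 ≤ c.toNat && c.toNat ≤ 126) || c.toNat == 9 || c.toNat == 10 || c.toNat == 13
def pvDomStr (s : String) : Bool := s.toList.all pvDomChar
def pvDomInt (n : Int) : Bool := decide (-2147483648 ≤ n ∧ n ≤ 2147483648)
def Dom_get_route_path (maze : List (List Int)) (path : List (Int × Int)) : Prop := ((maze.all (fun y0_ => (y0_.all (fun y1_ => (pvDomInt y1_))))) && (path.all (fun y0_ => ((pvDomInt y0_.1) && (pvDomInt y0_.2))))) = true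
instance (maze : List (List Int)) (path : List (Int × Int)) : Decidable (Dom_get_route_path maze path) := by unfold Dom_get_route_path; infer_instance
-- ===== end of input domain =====

-- B replaces A's per-cell priority classification by a base 0/1 grid plus path/end/start overlay writes (objective: faster — O(rows*cols+|path|) instead of a per-cell scan of path; measured faster in a timing run).
-- Pre_ excludes inputs where A raises IndexError (empty path with a nonempty first row; rows shorter than row 0 reached by the scan) and,
-- with them, ragged mazes whose short rows A only survives because the path covers the missing cells (B writes into the short row and raises there).


-- ===== PORT A =====
-- one cell of A's classification: the if/elif chain in the inner loop body.
-- path[0] / path[-1] are ported as headD/getLastD: Pre_ guarantees path ≠ [] whenever the body runs,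
-- and maze[i][j] as getD: Pre_ guarantees i, j in range, so the defaults are never taken.
def aCell (maze : List (List Int)) (path : List (Int × Int)) (i j : Nat) : Int :=
  let cell : Int × Int := ((i : Int), (j : Int))
  if path.headD (0, 0) = cell then 2
  else if path.getLastD (0, 0) = cell then 3
  else if cell ∈ path then 4
  else if (maze.getD i []).getD j 0 = 1 then 1
  else 0

def get_route_path (maze : List (List Int)) (path : List (Int × Int)) : List (List Int) :=
  (List.range maze.length).foldl (fun results i =>
    results ++ [(List.range (maze.headD []).length).foldl (fun inner j =>
      inner ++ [aCell maze path i j]) []]) []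

-- ===== PORT B =====
-- B's `put`: a bounds-guarded in-place write results[i][j] = v
def bPut (g : List (List Int)) (rows cols : Nat) (c : Int × Int) (v : Int) : List (List Int) :=
  if 0 ≤ c.1 ∧ c.1 < (rows : Int) ∧ 0 ≤ c.2 ∧ c.2 < (cols : Int) then
    g.modify c.1.toNat (fun row => row.set c.2.toNat v)
  else g

def get_route_path_alt (maze : List (List Int)) (path : List (Int × Int)) : List (List Int) :=
  let cols : Nat := (maze.headD []).length            -- len(maze[0]) if maze else 0
  -- row[:cols] is List.take cols (cols ≥ 0, so the slice is exactly take)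
  let base := maze.map (fun row => (row.take cols).map (fun v => if v = 1 then (1 : Int) else 0))
  if base ≠ [] ∧ 0 < cols ∧ path ≠ [] then
    let rows : Nat := maze.length
    let g1 := path.foldl (fun g c => bPut g rows cols c 4) base
    let g2 := bPut g1 rows cols (path.getLastD (0, 0)) 3
    bPut g2 rows cols (path.headD (0, 0)) 2
  else base

-- ===== PRECONDITION & SPEC =====
-- Pre_ excludes (a) empty path with maze having a nonempty first row (A raises IndexError on path[0]) and
-- (b) mazes with a row shorter than row 0 (A raises IndexError on maze[i][j] unless the path happens to
-- cover the missing cells — a value B cannot produce, since B writes into the short row and raises).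
def Pre_get_route_path (maze : List (List Int)) (path : List (Int × Int)) : Prop :=
  (∀ row ∈ maze, (maze.headD []).length ≤ row.length) ∧
  (path = [] → maze = [] ∨ (maze.headD []).length = 0)
instance (maze : List (List Int)) (path : List (Int × Int)) : Decidable (Pre_get_route_path maze path) := by
  unfold Pre_get_route_path; infer_instance
def pvWitness_get_route_path : List (List Int) × (List (Int × Int)) :=
  ([[1, 0], [0, 0]], [(0, 0), (1, 1)])
def Spec_get_route_path (maze : List (List Int)) (path : List (Int × Int)) (out : List (List Int)) : Prop := out = get_route_path_alt maze path
instance (maze : List (List Int)) (path : List (Int × Int)) (out : List (List Int)) : Decidable (Spec_get_route_path maze path out) := by unfold Spec_get_route_path; infer_instance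

-- ===== CLAIM (what is proved, stated in full; the proofs are below) =====
def Claim_equal_get_route_path : Prop := ∀ (maze : List (List Int)) (path : List (Int × Int)), Dom_get_route_path maze path → Pre_get_route_path maze path → Spec_get_route_path maze path (get_route_path maze path)

-- ===== LEMMAS AND PROOFS =====

-- the append-accumulator loop is the map over the range
theorem foldl_append_map {α β : Type} (f : α → β) (l : List α) (init : List β) :
    l.foldl (fun acc x => acc ++ [f x]) init = init ++ l.map f := by
  induction l generalizing init with
  | nil => simp
  | cons x xs ih => simp [List.foldl, ih]

-- cell accessor used throughout the proof
def acc (g : List (List Int)) (i j : Nat) : Int := (g.getD i []).getD j 0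

-- grid shape invariant
def shape (g : List (List Int)) (rows cols : Nat) : Prop :=
  g.length = rows ∧ ∀ k, k < rows → (g.getD k []).length = cols

theorem getD_modify (g : List (List Int)) (n : Nat) (f : List Int → List Int) (k : Nat) :
    (g.modify n f).getD k [] = if n = k ∧ k < g.length then f (g.getD k []) else g.getD k [] := by
  simp only [List.getD_eq_getElem?_getD, List.getElem?_modify]
  by_cases hk : k < g.length
  · rw [List.getElem?_eq_getElem hk]
    by_cases hn : n = k <;> simp [hn, hk]
  · rw [List.getElem?_eq_none (by omega)]
    simp [hk]

theorem bPut_shape {g : List (List Int)} {rows cols : Nat} (c : Int × Int) (v : Int)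
    (h : shape g rows cols) : shape (bPut g rows cols c v) rows cols := by
  unfold bPut
  split
  · refine ⟨by simp [List.length_modify, h.1], fun k hk => ?_⟩
    rw [getD_modify]
    split
    · simp only [List.length_set]
      exact h.2 k hk
    · exact h.2 k hk
  · exact h

theorem bPut_acc {g : List (List Int)} {rows cols : Nat} (c : Int × Int) (v : Int) {i j : Nat}
    (h : shape g rows cols) (hi : i < rows) (hj : j < cols) :
    acc (bPut g rows cols c v) i j =
      if c = ((i : Int), (j : Int)) then v else acc g i j := by
  unfold bPut acc
  split
  · rename_i hb
    rw [getD_modify]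
    split
    · rename_i hk
      by_cases hc : c = ((i : Int), (j : Int))
      · rw [if_pos hc]
        have hjlen : j < (g.getD i []).length := by rw [h.2 i hi]; exact hj
        subst hc
        simp only at hk ⊢
        rw [List.getD_eq_getElem?_getD] at hjlen
        rw [List.getD_eq_getElem?_getD, List.getElem?_set]
        simp [hjlen]
      · rw [if_neg hc]
        have hc1 : c.1 = (i : Int) := by omega
        have hc2 : c.2.toNat ≠ j := by
          intro hh
          exact hc (Prod.ext hc1 (by omega))
        rw [List.getD_eq_getElem?_getD, List.getElem?_set, if_neg hc2,
          ← List.getD_eq_getElem?_getD]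
    · rename_i hk
      by_cases hc : c = ((i : Int), (j : Int))
      · exact absurd ⟨by simp [hc], by rw [h.1]; exact hi⟩ hk
      · rw [if_neg hc]
  · rename_i hb
    have hc : c ≠ ((i : Int), (j : Int)) := by
      intro hh; subst hh
      exact hb ⟨by simp, by simp [hi], by simp, by simp [hj]⟩
    rw [if_neg hc]

theorem overlay_fold {path : List (Int × Int)} {g : List (List Int)} {rows cols : Nat} {i j : Nat}
    (h : shape g rows cols) (hi : i < rows) (hj : j < cols) :
    acc (path.foldl (fun g c => bPut g rows cols c 4) g) i j =
      if ((i : Int), (j : Int)) ∈ path then 4 else acc g i j := by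
  induction path generalizing g with
  | nil => simp
  | cons c rest ih =>
    simp only [List.foldl]
    rw [ih (bPut_shape c 4 h)]
    rw [bPut_acc c 4 h hi hj]
    by_cases hm : ((i : Int), (j : Int)) ∈ rest
    · simp [hm]
    · by_cases hc : c = ((i : Int), (j : Int)) <;> simp [hm, hc, List.mem_cons, eq_comm]

theorem overlay_shape (path : List (Int × Int)) {g : List (List Int)} {rows cols : Nat}
    (h : shape g rows cols) : shape (path.foldl (fun g c => bPut g rows cols c 4) g) rows cols := by
  induction path generalizing g with
  | nil => exact h
  | cons c rest ih => exact ih (bPut_shape c 4 h)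

-- a grid of the right shape is determined by its acc values
theorem grid_eq_of_acc {g : List (List Int)} {rows cols : Nat} (h : shape g rows cols)
    (f : Nat → Nat → Int) (hf : ∀ i j, i < rows → j < cols → acc g i j = f i j) :
    g = (List.range rows).map (fun i => (List.range cols).map (fun j => f i j)) := by
  apply List.ext_getElem
  · simp [h.1]
  · intro i hi hi'
    have hirows : i < rows := by simpa [h.1] using hi
    have hrowD : g.getD i [] = g[i] := by
      rw [List.getD_eq_getElem?_getD, List.getElem?_eq_getElem hi]; rfl
    have hlen : g[i].length = cols := by rw [← hrowD]; exact h.2 i hirows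
    apply List.ext_getElem
    · rw [hlen]; simp
    · intro j hj hj'
      have hjcols : j < cols := by omega
      have hval : acc g i j = g[i][j] := by
        rw [acc, hrowD, List.getD_eq_getElem?_getD, List.getElem?_eq_getElem hj]; rfl
      simp only [List.getElem_map, List.getElem_range]
      rw [← hval]
      exact hf i j hirows hjcols

theorem base_shape {maze : List (List Int)}
    (hrect : ∀ row ∈ maze, (maze.headD []).length ≤ row.length) :
    shape (maze.map (fun row => (row.take (maze.headD []).length).map (fun v => if v = 1 then (1 : Int) else 0)))
      maze.length (maze.headD []).length := by
  refine ⟨by simp, fun k hk => ?_⟩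
  have hk' : k < (maze.map (fun row => (row.take (maze.headD []).length).map (fun v => if v = 1 then (1 : Int) else 0))).length := by
    simpa using hk
  have hget : (maze.map (fun row => (row.take (maze.headD []).length).map (fun v => if v = 1 then (1 : Int) else 0))).getD k []
      = ((maze[k]'hk).take (maze.headD []).length).map (fun v => if v = 1 then (1 : Int) else 0) := by
    rw [List.getD_eq_getElem?_getD, List.getElem?_eq_getElem hk', List.getElem_map]
    rfl
  rw [hget]
  have hle := hrect _ (List.getElem_mem hk)
  simp only [List.length_map, List.length_take]
  omega

theorem base_acc {maze : List (List Int)} {i j : Nat}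
    (hrect : ∀ row ∈ maze, (maze.headD []).length ≤ row.length)
    (hi : i < maze.length) (hj : j < (maze.headD []).length) :
    acc (maze.map (fun row => (row.take (maze.headD []).length).map (fun v => if v = 1 then (1 : Int) else 0))) i j
      = if (maze.getD i []).getD j 0 = 1 then 1 else 0 := by
  unfold acc
  have hi' : i < (maze.map (fun row => (row.take (maze.headD []).length).map (fun v => if v = 1 then (1 : Int) else 0))).length := by
    simpa using hi
  have hrow : maze.getD i [] = maze[i]'hi := by
    rw [List.getD_eq_getElem?_getD, List.getElem?_eq_getElem hi]; rfl
  have hle : (maze.headD []).length ≤ (maze[i]'hi).length := hrect _ (List.getElem_mem hi)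
  have hjt : j < ((maze[i]'hi).take (maze.headD []).length).length := by
    simp only [List.length_take]; omega
  have hjt' : j < (((maze[i]'hi).take (maze.headD []).length).map (fun v => if v = 1 then (1 : Int) else 0)).length := by
    simpa using hjt
  have h1 : (maze.map (fun row => (row.take (maze.headD []).length).map (fun v => if v = 1 then (1 : Int) else 0))).getD i []
      = ((maze[i]'hi).take (maze.headD []).length).map (fun v => if v = 1 then (1 : Int) else 0) := by
    rw [List.getD_eq_getElem?_getD, List.getElem?_eq_getElem hi', List.getElem_map]
    rfl
  have hjlen : j < (maze[i]'hi).length := by omega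
  have h2 : (((maze[i]'hi).take (maze.headD []).length).map (fun v => if v = 1 then (1 : Int) else 0)).getD j 0
      = if ((maze[i]'hi).take (maze.headD []).length)[j]'hjt = 1 then (1 : Int) else 0 := by
    rw [List.getD_eq_getElem?_getD, List.getElem?_eq_getElem hjt', List.getElem_map]
    rfl
  rw [h1, h2, hrow]
  have h3 : ((maze[i]'hi).take (maze.headD []).length)[j]'hjt = (maze[i]'hi)[j]'hjlen :=
    List.getElem_take
  rw [h3, List.getD_eq_getElem?_getD, List.getElem?_eq_getElem hjlen]
  rfl

-- ===== VERDICT (by name: the statement is the Claim_ definition above) =====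
theorem get_route_path_spec : Claim_equal_get_route_path := by
  intro maze path _ hpre
  unfold Spec_get_route_path
  obtain ⟨hrect, hemp⟩ := hpre
  have hA : get_route_path maze path
      = (List.range maze.length).map (fun i =>
          (List.range (maze.headD []).length).map (fun j => aCell maze path i j)) := by
    unfold get_route_path
    rw [foldl_append_map]
    simp only [List.nil_append]
    congr 1
    funext i
    rw [foldl_append_map]
    simp
  rw [hA]
  simp only [get_route_path_alt]
  split
  · rename_i hcond
    obtain ⟨-, hc, -⟩ := hcond
    have hbs : shape (maze.map (fun row => (row.take (maze.headD []).length).map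
        (fun v => if v = 1 then (1 : Int) else 0))) maze.length (maze.headD []).length :=
      base_shape hrect
    have hg1s := overlay_shape path hbs
    have hg2s := bPut_shape (path.getLastD (0, 0)) 3 hg1s
    symm
    apply grid_eq_of_acc (bPut_shape (path.headD (0, 0)) 2 hg2s)
    intro i j hi hj
    rw [bPut_acc _ 2 hg2s hi hj, bPut_acc _ 3 hg1s hi hj, overlay_fold hbs hi hj,
      base_acc hrect hi hj]
    unfold aCell
    simp only []
  · rename_i hcond
    by_cases hm : maze = []
    · subst hm; simp
    · have hc0 : (maze.headD []).length = 0 := by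
        rcases not_and_or.mp hcond with h | h
        · exact absurd (List.map_eq_nil_iff.mp (not_not.mp h)) hm
        · rcases not_and_or.mp h with h2 | h2
          · omega
          · rcases hemp (not_not.mp h2) with h3 | h3
            · exact absurd h3 hm
            · exact h3
      rw [hc0]
      apply List.ext_getElem <;> simp
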